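-- pv_equiv track=rewrite | github.com/Marcos-Fonseca/crypto_algorithms | cifras/vegenere.py | _tratar_chave
-- ===== SOURCE A (Python) =====
-- def _tratar_chave(chave: str, msg: str) -> str:
--     """Aumenta o tamanho da chave pra que tenha o mesmo tamanho da mensagem"""
--
--     chave = list(chave)
--     nova_chave = []
--
--     for caractere in msg:
--         if caractere != ' ':
--             nova_chave.append(chave[0])
--             chave.append(chave[0])
--             del(chave[0])
--         else:
--             nova_chave.append(' ')
--
--     return ''.join(nova_chave)
-- ===== SOURCE B (Python) =====
-- def _tratar_chave(chave: str, msg: str) -> str: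
--     """Aumenta o tamanho da chave pra que tenha o mesmo tamanho da mensagem"""
--     out = []
--     i = 0
--     for caractere in msg:
--         if caractere == ' ':
--             out.append(' ')
--         else:
--             out.append(chave[i % len(chave)])
--             i += 1
--     return ''.join(out)
-- ===== Notes on version B (the rewrite author's own statement) =====
-- stated objective: faster
-- what changed: Replaces A's O(k) list rotation (append head, delete index 0) per non-space character with a non-space counter indexed mod len(chave), so the key list is never mutated.
import Mathlib
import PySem

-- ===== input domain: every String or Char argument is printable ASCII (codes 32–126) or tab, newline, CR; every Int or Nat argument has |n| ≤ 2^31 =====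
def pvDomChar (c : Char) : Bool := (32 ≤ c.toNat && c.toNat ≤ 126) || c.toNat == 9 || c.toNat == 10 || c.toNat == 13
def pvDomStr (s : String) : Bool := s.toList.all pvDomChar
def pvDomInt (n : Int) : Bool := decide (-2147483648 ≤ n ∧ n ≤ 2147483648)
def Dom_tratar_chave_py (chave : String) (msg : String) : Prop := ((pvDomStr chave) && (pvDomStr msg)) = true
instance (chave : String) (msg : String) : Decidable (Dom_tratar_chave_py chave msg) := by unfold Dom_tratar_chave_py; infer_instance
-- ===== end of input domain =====

-- B replaces A's per-character O(k) key-list rotation with a non-space counter indexed mod len(chave): asymptotically faster, key never mutated.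

-- ===== PORT A =====
-- loop state: nova_chave accumulator (in order) and the mutable key list `ch`;
-- each non-space step does nova_chave.append(ch[0]); ch.append(ch[0]); del ch[0].
-- ch = [] with a non-space character is Python's IndexError (excluded by Pre_):
-- the recursion stops there, exact everywhere inside Pre_.
def tcA : List Char → List Char → List Char → List Char
  | acc, _, [] => acc
  | acc, ch, c :: rest =>
    if c ≠ ' ' then
      match ch with
      | [] => acc                      -- IndexError site; outside Pre_
      | k :: ks => tcA (acc ++ [k]) (ks ++ [k]) rest   -- append then del(0)
    else tcA (acc ++ [' ']) ch rest

def tratar_chave_py (chave : String) (msg : String) : String :=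
  String.ofList (tcA [] chave.toList msg.toList)

-- ===== PORT B =====
-- out accumulator, non-space counter i; chave[i % len(chave)] via getElem?
-- (i % 0 would be Python's ZeroDivisionError: the `none` branch, outside Pre_).
def tcB (chave : List Char) : Nat → List Char → List Char → List Char
  | _, acc, [] => acc
  | i, acc, c :: rest =>
    if c = ' ' then tcB chave i (acc ++ [' ']) rest
    else
      match chave[(i % chave.length)]? with
      | none => acc                    -- ZeroDivisionError site; outside Pre_
      | some k => tcB chave (i + 1) (acc ++ [k]) rest

def tratar_chave_py_alt (chave : String) (msg : String) : String :=
  String.ofList (tcB chave.toList 0 [] msg.toList)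

-- ===== PRECONDITION & SPEC =====
-- Pre_ excludes exactly the inputs where both Pythons raise (A: IndexError, B:
-- ZeroDivisionError): empty key together with a non-space character in msg.
def Pre_tratar_chave_py (chave : String) (msg : String) : Prop :=
  chave ≠ "" ∨ ∀ c ∈ msg.toList, c = ' '
instance (chave : String) (msg : String) : Decidable (Pre_tratar_chave_py chave msg) := by
  unfold Pre_tratar_chave_py; infer_instance

def pvWitness_tratar_chave_py : String × String := ("key", "ola mundo")

def Spec_tratar_chave_py (chave : String) (msg : String) (out : String) : Prop := out = tratar_chave_py_alt chave msg
instance (chave : String) (msg : String) (out : String) : Decidable (Spec_tratar_chave_py chave msg out) := by unfold Spec_tratar_chave_py; infer_instance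

-- ===== CLAIM (what is proved, stated in full; the proofs are below) =====
def Claim_equal_tratar_chave_py : Prop := ∀ (chave : String) (msg : String), Dom_tratar_chave_py chave msg → Pre_tratar_chave_py chave msg → Spec_tratar_chave_py chave msg (tratar_chave_py chave msg)

-- ===== LEMMAS AND PROOFS =====

-- A's key state after i non-space characters is k0.rotate i.
lemma tcA_eq_tcB (k0 : List Char) (hk : k0 ≠ []) :
    ∀ (msg : List Char) (i : Nat) (acc : List Char),
      tcA acc (k0.rotate i) msg = tcB k0 i acc msg := by
  intro msg
  induction msg with
  | nil => intro i acc; simp [tcA, tcB]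
  | cons c rest ih =>
    intro i acc
    by_cases hc : c = ' '
    · simp [tcA, tcB, hc, ih]
    · have hlen : (k0.rotate i).length = k0.length := by simp
      have hne : k0.rotate i ≠ [] := by
        simpa [List.rotate_eq_nil_iff] using hk
      obtain ⟨k, ks, hks⟩ := List.exists_cons_of_ne_nil hne
      have hpos : 0 < k0.length := List.length_pos_of_ne_nil hk
      -- head of the rotation is k0[i % len]
      have hget : k0[(i % k0.length)]? = some k := by
        have h0 : (k0.rotate i)[0]? = some k := by simp [hks]
        rw [List.getElem?_rotate] at h0
        · simpa using h0
        · exact hpos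
      -- rotating one more step
      have hstep : ks ++ [k] = k0.rotate (i + 1) := by
        have : (k0.rotate i).rotate 1 = k0.rotate (i + 1) := by
          rw [List.rotate_rotate]
        rw [← this, hks]
        simp [List.rotate_cons_succ]
      calc tcA acc (k0.rotate i) (c :: rest)
          = tcA (acc ++ [k]) (ks ++ [k]) rest := by simp [tcA, hks, hc]
        _ = tcA (acc ++ [k]) (k0.rotate (i + 1)) rest := by rw [hstep]
        _ = tcB k0 (i + 1) (acc ++ [k]) rest := ih (i + 1) (acc ++ [k])
        _ = tcB k0 i acc (c :: rest) := by simp [tcB, hc, hget]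

-- with an empty key, an all-space message is copied through by both loops
lemma tcA_spaces (msg : List Char) (hsp : ∀ c ∈ msg, c = ' ') :
    ∀ acc ch, tcA acc ch msg = acc ++ msg := by
  induction msg with
  | nil => simp [tcA]
  | cons c rest ih =>
    intro acc ch
    have hc : c = ' ' := hsp c (by simp)
    have hr : ∀ c ∈ rest, c = ' ' := fun c hcm => hsp c (by simp [hcm])
    subst hc
    simp [tcA, ih hr]

lemma tcB_spaces (k0 : List Char) (msg : List Char) (hsp : ∀ c ∈ msg, c = ' ') :
    ∀ i acc, tcB k0 i acc msg = acc ++ msg := by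
  induction msg with
  | nil => simp [tcB]
  | cons c rest ih =>
    intro i acc
    have hc : c = ' ' := hsp c (by simp)
    have hr : ∀ c ∈ rest, c = ' ' := fun c hcm => hsp c (by simp [hcm])
    subst hc
    simp [tcB, ih hr]

lemma toList_ne_nil_of_ne_empty {s : String} (h : s ≠ "") : s.toList ≠ [] := by
  intro hnil
  apply h
  have h2 := congrArg String.ofList hnil
  simpa using h2

-- ===== VERDICT (by name: the statement is the Claim_ definition above) =====
theorem tratar_chave_py_spec : Claim_equal_tratar_chave_py := by
  intro chave msg _ hpre
  unfold Spec_tratar_chave_py tratar_chave_py tratar_chave_py_alt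
  rcases hpre with hne | hsp
  · have hk : chave.toList ≠ [] := toList_ne_nil_of_ne_empty hne
    rw [show chave.toList = chave.toList.rotate 0 by simp]
    rw [tcA_eq_tcB chave.toList hk msg.toList 0 []]
    simp
  · rw [tcA_spaces msg.toList hsp, tcB_spaces chave.toList msg.toList hsp]
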